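-- pv_equiv track=rewrite | github.com/iitpvisionlab/adrt | list_patterns.py | normalize_pattern
-- ===== SOURCE A (Python) =====
-- def normalize_pattern(p: list[int], w: int) -> list[int]:
--     prev = 0
--     add = -p[0]
--     ret: list[int] = []
--     for val in p:
--         if val < prev:
--             add += w
--         prev = val
--         new_val = val + add
--         ret.append(new_val)
--     return ret
-- ===== SOURCE B (Python) =====
-- def normalize_pattern(p: list[int], w: int) -> list[int]:
--     base = p[0]
--     # positions of "wrap" descents (value smaller than its predecessor; predecessor of index 0 is 0)
--     drops = []
--     for j in range(len(p)):
--         prev = p[j - 1] if j > 0 else 0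
--         if p[j] < prev:
--             drops.append(j)
--     # drops is sorted ascending; for each i count descent positions <= i by binary search
--     ret = []
--     for i in range(len(p)):
--         lo, hi = 0, len(drops)
--         while lo < hi:
--             mid = (lo + hi) // 2
--             if drops[mid] <= i:
--                 lo = mid + 1
--             else:
--                 hi = mid
--         ret.append(p[i] - base + w * lo)
--     return ret
-- ===== Notes on version B (the rewrite author's own statement) =====
-- stated objective: alternative
-- what changed: B first collects the sorted list of descent POSITIONS (indices whose value is smaller than its predecessor, predecessor of index 0 being 0), then maps each index i to p[i] - p[0] + w * (number of descent positions <= i), obtained by a hand-written binary search over that position list, instead of A's single pass threading a running (prev, add) accumulator.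
import Mathlib
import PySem

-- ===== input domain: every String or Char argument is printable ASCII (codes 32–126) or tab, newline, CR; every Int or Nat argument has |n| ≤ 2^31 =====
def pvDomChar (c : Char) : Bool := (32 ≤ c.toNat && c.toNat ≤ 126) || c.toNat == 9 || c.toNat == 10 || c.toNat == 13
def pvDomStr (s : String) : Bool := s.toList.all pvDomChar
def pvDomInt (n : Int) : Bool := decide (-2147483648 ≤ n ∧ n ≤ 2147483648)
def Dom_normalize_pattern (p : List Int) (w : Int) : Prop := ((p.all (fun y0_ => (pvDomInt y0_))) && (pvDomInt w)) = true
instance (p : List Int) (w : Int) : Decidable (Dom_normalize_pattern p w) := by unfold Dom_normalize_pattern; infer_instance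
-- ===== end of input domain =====

-- B replaces A's single (prev, add) accumulator pass by a descent-POSITION index: it collects the
-- indices where the pattern wraps, then maps each index i to p[i] - p[0] + w * (#descent positions ≤ i).
-- Objective: alternative (different algorithm, B is a nested scan over the descent-position list).
-- Both Pythons raise IndexError on p = [] (p[0]); Pre_ excludes exactly that.

-- ===== PORT A =====
-- A's loop: state (prev, add, ret), appending val + add after conditionally bumping add.
def normalize_pattern (p : List Int) (w : Int) : List Int :=
  match p with
  | [] => []   -- unreachable under Pre_ (Python raises IndexError at p[0])
  | p0 :: _ =>
    (p.foldl (fun (st : Int × Int × List Int) val =>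
        let add := if val < st.1 then st.2.1 + w else st.2.1
        (val, add, st.2.2 ++ [val + add])) (0, -p0, ([] : List Int))).2.2

-- ===== PORT B =====
-- B's while loop: binary search for the number of drop positions ≤ i (lo, hi are nonnegative
-- Python ints, so Nat with Nat division is exact for (lo + hi) // 2)
def bsCount (drops : List Int) (i : Int) (lo hi : Nat) : Nat :=
  if lo < hi then
    let mid := (lo + hi) / 2
    if PySem.List.pyGetD drops (mid : Int) 0 ≤ i then bsCount drops i (mid + 1) hi
    else bsCount drops i lo mid
  else lo
termination_by hi - lo
decreasing_by all_goals omega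

-- B: collect descent positions, then per output index count positions ≤ i by binary search.
def normalize_pattern_alt (p : List Int) (w : Int) : List Int :=
  match p with
  | [] => []   -- unreachable under Pre_ (Python raises IndexError at p[0])
  | p0 :: _ =>
    let drops := (PySem.List.pyRange 0 (p.length : Int) 1).foldl
      (fun (acc : List Int) j =>
        let prev := if 0 < j then PySem.List.pyGetD p (j - 1) 0 else 0
        if PySem.List.pyGetD p j 0 < prev then acc ++ [j] else acc) []
    (PySem.List.pyRange 0 (p.length : Int) 1).foldl
      (fun (ret : List Int) i =>
        ret ++ [PySem.List.pyGetD p i 0 - p0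
          + w * (bsCount drops i 0 drops.length : Int)]) []

-- ===== PRECONDITION & SPEC =====
-- Pre_ excludes only p = [], on which both Pythons raise IndexError.
def Pre_normalize_pattern (p : List Int) (_w : Int) : Prop := p ≠ []
instance (p : List Int) (w : Int) : Decidable (Pre_normalize_pattern p w) := by unfold Pre_normalize_pattern; infer_instance
def pvWitness_normalize_pattern : List Int × Int := ([3, 1, 4, 1], 5)

def Spec_normalize_pattern (p : List Int) (w : Int) (out : List Int) : Prop := out = normalize_pattern_alt p w
instance (p : List Int) (w : Int) (out : List Int) : Decidable (Spec_normalize_pattern p w out) := by unfold Spec_normalize_pattern; infer_instance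

-- ===== CLAIM (what is proved, stated in full; the proofs are below) =====
def Claim_equal_normalize_pattern : Prop := ∀ (p : List Int) (w : Int), Dom_normalize_pattern p w → Pre_normalize_pattern p w → Spec_normalize_pattern p w (normalize_pattern p w)

-- ===== LEMMAS AND PROOFS =====

-- descent indicator at Nat index j of l, with predecessor-of-0 taken to be prev
def descN (prev : Int) (l : List Int) (j : Nat) : Bool :=
  decide (l.getD j 0 < (if j = 0 then prev else l.getD (j - 1) 0))

-- reference recursion: one step of A's loop
def npAux (w : Int) : Int → Int → List Int → List Int
  | _, _, [] => []
  | prev, add, v :: t =>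
    let a := if v < prev then add + w else add
    (v + a) :: npAux w v a t

theorem npA_foldl (w prev add : Int) (l acc : List Int) :
    (l.foldl (fun (st : Int × Int × List Int) val =>
        let a := if val < st.1 then st.2.1 + w else st.2.1
        (val, a, st.2.2 ++ [val + a])) (prev, add, acc)).2.2
      = acc ++ npAux w prev add l := by
  induction l generalizing prev add acc with
  | nil => simp [npAux]
  | cons v t ih => simp [npAux, ih, List.append_assoc]

theorem descN_cons_succ (prev v : Int) (t : List Int) (j : Nat) :
    descN prev (v :: t) (j + 1) = descN v t j := by
  cases j <;> simp [descN, List.getD]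

theorem countP_descN_cons (prev v : Int) (t : List Int) (k : Nat) :
    (List.range (k + 1)).countP (descN prev (v :: t))
      = (if v < prev then 1 else 0) + (List.range k).countP (descN v t) := by
  rw [List.range_succ_eq_map, List.countP_cons, List.countP_map]
  have h1 : descN prev (v :: t) 0 = decide (v < prev) := by simp [descN]
  have h2 : (List.range k).countP (descN prev (v :: t) ∘ Nat.succ)
      = (List.range k).countP (descN v t) := by
    apply List.countP_congr
    intro j _
    rw [Function.comp_apply, descN_cons_succ prev v t j]
  rw [h2, h1]
  split_ifs <;> simp_all <;> omega

theorem npAux_eq_map (w : Int) (l : List Int) (prev add : Int) :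
    npAux w prev add l
      = (List.range l.length).map
          (fun i => l.getD i 0 + add + w * ((List.range (i + 1)).countP (descN prev l) : Int)) := by
  induction l generalizing prev add with
  | nil => simp [npAux]
  | cons v t ih =>
    rw [List.length_cons, List.range_succ_eq_map, List.map_cons, List.map_map]
    show _ :: _ = _ :: _
    congr 1
    · simp [descN, List.countP_cons]
      split_ifs <;> ring
    · show npAux w v _ t = _
      rw [ih]
      apply List.map_congr_left
      intro i _
      simp only [Function.comp_apply]
      rw [countP_descN_cons prev v t (i + 1)]
      simp only [List.getD_cons_succ]
      split_ifs <;> push_cast <;> ring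

theorem countP_le_range (P : Nat → Bool) (i n : Nat) (h : i < n) :
    (List.range n).countP (fun j => decide (j ≤ i) && P j)
      = (List.range (i + 1)).countP P := by
  obtain ⟨m, rfl⟩ : ∃ m, n = (i + 1) + m := ⟨n - (i + 1), by omega⟩
  rw [List.range_add, List.countP_append]
  have h2 : (List.map (fun x => i + 1 + x) (List.range m)).countP
      (fun j => decide (j ≤ i) && P j) = 0 := by
    rw [List.countP_map]
    apply List.countP_eq_zero.mpr
    intro x _
    have hni : ¬ (i + 1 + x ≤ i) := by omega
    simp [hni]
  have h1 : (List.range (i + 1)).countP (fun j => decide (j ≤ i) && P j)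
      = (List.range (i + 1)).countP P := by
    apply List.countP_congr
    intro x hx
    rw [List.mem_range] at hx
    simp [Nat.le_of_lt_succ hx]
  rw [h1, h2, Nat.add_zero]

-- B's descent test at a cast Nat index is descN 0
theorem drop_step (p : List Int) (acc : List Int) (j : Nat) :
    (if PySem.List.pyGetD p (j : Int) 0
        < (if 0 < (j : Int) then PySem.List.pyGetD p ((j : Int) - 1) 0 else 0)
      then acc ++ [(j : Int)] else acc)
      = if descN 0 p j then acc ++ [(j : Int)] else acc := by
  cases j with
  | zero => simp [descN, PySem.List.pyGetD_zero, List.getD]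
  | succ m =>
    have hm : (((m + 1 : Nat)) : Int) - 1 = ((m : Nat) : Int) := by push_cast; ring
    have hpos : (0 : Int) < ((m + 1 : Nat) : Int) := by exact_mod_cast Nat.succ_pos m
    simp only [descN, hm, hpos, if_true, PySem.List.pyGetD_natCast]
    simp [List.getD]

-- a list with an all-true prefix of length m and all-false tail has countP = m
theorem countP_eq_of_prefix (P : Int → Bool) (l : List Int) (m : Nat) (hm : m ≤ l.length)
    (h1 : ∀ k, k < m → P (l.getD k 0) = true)
    (h2 : ∀ k, m ≤ k → k < l.length → P (l.getD k 0) = false) :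
    l.countP P = m := by
  conv_lhs => rw [← List.take_append_drop m l]
  rw [List.countP_append]
  have ht : (l.take m).countP P = m := by
    rw [List.countP_eq_length.mpr, List.length_take_of_le hm]
    intro a ha
    obtain ⟨k, hk, rfl⟩ := List.mem_iff_getElem.mp ha
    have hk' : k < m := by rw [List.length_take] at hk; omega
    have hkl : k < l.length := by omega
    rw [List.getElem_take]
    have := h1 k hk'
    rwa [List.getD_eq_getElem l 0 hkl] at this
  have hd : (l.drop m).countP P = 0 := by
    apply List.countP_eq_zero.mpr
    intro a ha
    obtain ⟨k, hk, rfl⟩ := List.mem_iff_getElem.mp ha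
    rw [List.length_drop] at hk
    have hkl : m + k < l.length := by omega
    rw [List.getElem_drop]
    have := h2 (m + k) (by omega) hkl
    rw [List.getD_eq_getElem l 0 hkl] at this
    simp [this]
  omega

-- binary search over a monotone list counts the elements ≤ i
theorem bsCount_eq_countP (drops : List Int) (i : Int)
    (hmono : ∀ a b : Nat, a ≤ b → b < drops.length → drops.getD a 0 ≤ drops.getD b 0) :
    ∀ n lo hi, hi - lo ≤ n → lo ≤ hi → hi ≤ drops.length →
    (∀ k, k < lo → drops.getD k 0 ≤ i) →
    (∀ k, hi ≤ k → k < drops.length → i < drops.getD k 0) →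
    bsCount drops i lo hi = drops.countP (fun d => decide (d ≤ i)) := by
  intro n
  induction n with
  | zero =>
    intro lo hi hfuel hle hlen hlow hhigh
    have heq : lo = hi := by omega
    rw [bsCount, if_neg (by omega)]
    refine (countP_eq_of_prefix _ _ lo (by omega) ?_ ?_).symm
    · intro k hk
      simpa using hlow k hk
    · intro k hk1 hk2
      simpa using not_le.mpr (hhigh k (by omega) hk2)
  | succ n ih =>
    intro lo hi hfuel hle hlen hlow hhigh
    rw [bsCount]
    by_cases hlt : lo < hi
    · rw [if_pos hlt]
      have hm1 : lo ≤ (lo + hi) / 2 := by omega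
      have hm2 : (lo + hi) / 2 < hi := by omega
      have hmidlen : (lo + hi) / 2 < drops.length := by omega
      show (if PySem.List.pyGetD drops (((lo + hi) / 2 : Nat) : Int) 0 ≤ i
          then bsCount drops i ((lo + hi) / 2 + 1) hi
          else bsCount drops i lo ((lo + hi) / 2)) = _
      rw [show PySem.List.pyGetD drops (((lo + hi) / 2 : Nat) : Int) 0
            = drops.getD ((lo + hi) / 2) 0 from PySem.List.pyGetD_natCast ..]
      by_cases htest : drops.getD ((lo + hi) / 2) 0 ≤ i
      · rw [if_pos htest]
        apply ih ((lo + hi) / 2 + 1) hi (by omega) (by omega) hlen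
        · intro k hk
          rcases Nat.lt_or_ge k lo with h | h
          · exact hlow k h
          · exact le_trans (hmono k ((lo + hi) / 2) (by omega) hmidlen) htest
        · exact hhigh
      · rw [if_neg htest]
        apply ih lo ((lo + hi) / 2) (by omega) (by omega) (by omega) hlow
        intro k hk1 hk2
        exact lt_of_lt_of_le (not_le.mp htest) (hmono ((lo + hi) / 2) k hk1 hk2)
    · rw [if_neg hlt]
      have heq : lo = hi := by omega
      refine (countP_eq_of_prefix _ _ lo (by omega) ?_ ?_).symm
      · intro k hk
        simpa using hlow k hk
      · intro k hk1 hk2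
        simpa using not_le.mpr (hhigh k (by omega) hk2)

-- the descent-position list is monotone
theorem drops_mono (p : List Int) :
    ∀ a b : Nat, a ≤ b →
      b < (((List.range p.length).filter (descN 0 p)).map (Nat.cast : Nat → Int)).length →
      (((List.range p.length).filter (descN 0 p)).map ((Nat.cast : Nat → Int))).getD a 0
        ≤ (((List.range p.length).filter (descN 0 p)).map ((Nat.cast : Nat → Int))).getD b 0 := by
  intro a b hab hb
  have hpair : (((List.range p.length).filter (descN 0 p)).map ((Nat.cast : Nat → Int))).Pairwise (· ≤ ·) := by
    rw [List.pairwise_map]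
    apply List.Pairwise.imp (fun h => by exact_mod_cast Int.ofNat_le.mpr (Nat.le_of_lt h))
    exact List.Pairwise.sublist List.filter_sublist List.pairwise_lt_range
  rcases Nat.eq_or_lt_of_le hab with rfl | hab'
  · exact le_refl _
  · have hlen : b < (((List.range p.length).filter (descN 0 p)).map ((Nat.cast : Nat → Int))).length := by
      simpa using hb
    have halen : a < (((List.range p.length).filter (descN 0 p)).map ((Nat.cast : Nat → Int))).length := by omega
    rw [List.getD_eq_getElem _ 0 halen, List.getD_eq_getElem _ 0 hlen]
    exact (List.pairwise_iff_getElem.mp hpair) a b halen hlen hab'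

-- B's output as the same map formula
theorem npB_eq_map (p0 : Int) (t : List Int) (w : Int) :
    normalize_pattern_alt (p0 :: t) w
      = (List.range (p0 :: t).length).map
          (fun i => (p0 :: t).getD i 0 - p0
            + w * ((List.range (i + 1)).countP (descN 0 (p0 :: t)) : Int)) := by
  simp only [normalize_pattern_alt]
  rw [PySem.List.pyRange_zero_nat, List.foldl_map, List.foldl_map]
  simp only [drop_step]
  rw [PySem.List.foldl_append_if, List.nil_append,
    PySem.List.foldl_append_singleton_eq_map, List.nil_append]
  apply List.map_congr_left
  intro i hi
  rw [List.mem_range] at hi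
  rw [bsCount_eq_countP _ (i : Int) (drops_mono (p0 :: t)) _ 0 _ (le_refl _) (by omega)
        (by simp) (by omega) (by omega)]
  rw [List.countP_map, List.countP_filter]
  have hc : (List.range (p0 :: t).length).countP
      (fun j => ((fun d => decide (d ≤ (i : Int))) ∘ (Nat.cast : Nat → Int)) j && descN 0 (p0 :: t) j)
      = (List.range (i + 1)).countP (descN 0 (p0 :: t)) := by
    rw [← countP_le_range (descN 0 (p0 :: t)) i _ hi]
    apply List.countP_congr
    intro x _
    simp
  rw [hc]
  simp

-- ===== VERDICT (by name: the statement is the Claim_ definition above) =====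
theorem normalize_pattern_spec : Claim_equal_normalize_pattern := by
  intro p w _ hp
  unfold Spec_normalize_pattern
  cases p with
  | nil => exact absurd rfl hp
  | cons p0 t =>
    rw [npB_eq_map]
    show (normalize_pattern (p0 :: t) w) = _
    have hA : normalize_pattern (p0 :: t) w = npAux w 0 (-p0) (p0 :: t) := by
      simp only [normalize_pattern]
      rw [npA_foldl, List.nil_append]
    rw [hA, npAux_eq_map]
    apply List.map_congr_left
    intro i _
    ring
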